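-- pv_equiv track=rewrite | github.com/Vicvargas/RegistroElectores | menoshombres.py | especial
-- ===== SOURCE A (Python) =====
-- def especial(men,viejaLista,indice,arch, result):
--     if indice == len(viejaLista):
--         return "República de Costa Rica, 07-09-2018, " + arch + ", " + result + '1'
--     if viejaLista[indice][1] == '1':
--         if viejaLista[indice][0] == "TRINIDAD":
--             return especial(men, viejaLista, indice+1, arch, result + viejaLista[indice][0] + " Y TOBAGO, ")
--         else:
--             return especial(men, viejaLista, indice+1, arch, result + viejaLista[indice][0] + ", ")
--     else:
--         return especial(men, viejaLista, indice+1, arch, result)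
-- ===== SOURCE B (Python) =====
-- def especial(men, viejaLista, indice, arch, result):
--     # Collect the qualifying names first, then build the output in one join.
--     nombres = []
--     for i in range(indice, len(viejaLista)):
--         nombre, marca = viejaLista[i]
--         if marca == '1':
--             nombres.append("TRINIDAD Y TOBAGO" if nombre == "TRINIDAD" else nombre)
--     return ("República de Costa Rica, 07-09-2018, " + arch + ", " + result
--             + "".join(n + ", " for n in nombres) + "1")
-- ===== Notes on version B (the rewrite author's own statement) =====
-- stated objective: idiomatic
-- what changed: Replaces A's accumulator-threading recursion with a single for-loop that collects the qualifying names into a list and one ''.join that assembles the output, avoiding Python's recursion depth limit.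
import Mathlib
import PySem

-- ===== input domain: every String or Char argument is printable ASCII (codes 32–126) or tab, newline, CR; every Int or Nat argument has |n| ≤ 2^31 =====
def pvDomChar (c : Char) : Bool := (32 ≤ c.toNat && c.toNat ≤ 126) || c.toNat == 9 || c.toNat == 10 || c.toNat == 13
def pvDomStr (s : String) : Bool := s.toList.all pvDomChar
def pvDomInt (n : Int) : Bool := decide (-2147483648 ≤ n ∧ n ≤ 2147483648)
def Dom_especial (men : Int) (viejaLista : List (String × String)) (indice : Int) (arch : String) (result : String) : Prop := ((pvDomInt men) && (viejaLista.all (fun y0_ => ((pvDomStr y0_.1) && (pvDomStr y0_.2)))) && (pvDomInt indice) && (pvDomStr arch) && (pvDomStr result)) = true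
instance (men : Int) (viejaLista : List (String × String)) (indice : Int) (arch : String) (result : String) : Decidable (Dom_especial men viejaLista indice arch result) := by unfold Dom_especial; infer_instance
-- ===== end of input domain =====

-- B collects the qualifying names with one loop and joins them once, instead of A's
-- accumulator-threading recursion; equal cost, more idiomatic.

-- ===== PORT A =====
-- A's tail recursion over indice, with enough fuel to reach len(viejaLista) from indice
-- (under Pre_ the fuel is never exhausted; viejaLista[indice] is pyGetD, in range under Pre_).
def especialGo (viejaLista : List (String × String)) (arch : String) :
    Nat → Int → String → String
  | 0, _, result => result
  | fuel + 1, indice, result =>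
    if indice = (viejaLista.length : Int) then
      "República de Costa Rica, 07-09-2018, " ++ arch ++ ", " ++ result ++ "1"
    else
      let p := PySem.List.pyGetD viejaLista indice ("", "")
      if p.2 = "1" then
        if p.1 = "TRINIDAD" then
          especialGo viejaLista arch fuel (indice + 1) (result ++ p.1 ++ " Y TOBAGO, ")
        else
          especialGo viejaLista arch fuel (indice + 1) (result ++ p.1 ++ ", ")
      else
        especialGo viejaLista arch fuel (indice + 1) result

def especial (men : Int) (viejaLista : List (String × String)) (indice : Int) (arch : String) (result : String) : String :=
  especialGo viejaLista arch (((viejaLista.length : Int) - indice).toNat + 1) indice result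

-- ===== PORT B =====
def especial_alt (men : Int) (viejaLista : List (String × String)) (indice : Int) (arch : String) (result : String) : String :=
  let nombres := (PySem.List.pyRange indice (viejaLista.length : Int) 1).foldl
    (fun acc i =>
      let p := PySem.List.pyGetD viejaLista i ("", "")
      if p.2 = "1" then
        acc ++ [if p.1 = "TRINIDAD" then "TRINIDAD Y TOBAGO" else p.1]
      else acc) []
  "República de Costa Rica, 07-09-2018, " ++ arch ++ ", " ++ result ++
    PySem.Str.join "" (nombres.map (fun n => n ++ ", ")) ++ "1"

-- ===== PRECONDITION & SPEC =====
-- Exactly the inputs on which the Python A returns (outside, viejaLista[indice] raises IndexError).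
def Pre_especial (men : Int) (viejaLista : List (String × String)) (indice : Int) (arch : String) (result : String) : Prop :=
  -(viejaLista.length : Int) ≤ indice ∧ indice ≤ (viejaLista.length : Int)
instance (men : Int) (viejaLista : List (String × String)) (indice : Int) (arch : String) (result : String) : Decidable (Pre_especial men viejaLista indice arch result) := by unfold Pre_especial; infer_instance

def pvWitness_especial : Int × (List (String × String)) × Int × String × String :=
  (0, [("ANA", "1"), ("BOB", "0"), ("TRINIDAD", "1")], 0, "file.txt", "")

def Spec_especial (men : Int) (viejaLista : List (String × String)) (indice : Int) (arch : String) (result : String) (out : String) : Prop := out = especial_alt men viejaLista indice arch result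
instance (men : Int) (viejaLista : List (String × String)) (indice : Int) (arch : String) (result : String) (out : String) : Decidable (Spec_especial men viejaLista indice arch result out) := by unfold Spec_especial; infer_instance

-- ===== CLAIM (what is proved, stated in full; the proofs are below) =====
def Claim_equal_especial : Prop := ∀ (men : Int) (viejaLista : List (String × String)) (indice : Int) (arch : String) (result : String), Dom_especial men viejaLista indice arch result → Pre_especial men viejaLista indice arch result → Spec_especial men viejaLista indice arch result (especial men viejaLista indice arch result)

-- ===== LEMMAS AND PROOFS =====

theorem join_empty_cons (x : String) (xs : List String) :
    PySem.Str.join "" (x :: xs) = x ++ PySem.Str.join "" xs := by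
  cases xs <;>
    simp [PySem.Str.join, PySem.Chars.join_nil, PySem.Chars.join_singleton,
      PySem.Chars.join_cons_cons]

-- the string that B appends after `result` when the scan starts at `ind`
def pvTail (L : List (String × String)) (ind : Int) : String :=
  PySem.Str.join ""
    (((PySem.List.pyRange ind (L.length : Int) 1).foldl
      (fun acc i =>
        let p := PySem.List.pyGetD L i ("", "")
        if p.2 = "1" then
          acc ++ [if p.1 = "TRINIDAD" then "TRINIDAD Y TOBAGO" else p.1]
        else acc) []).map (fun n => n ++ ", "))

theorem pvTail_nil (L : List (String × String)) : pvTail L (L.length : Int) = "" := by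
  simp [pvTail, PySem.List.pyRange_one_eq_nil le_rfl, PySem.Str.join, PySem.Chars.join_nil]

theorem foldl_step_eq (L : List (String × String)) (l : List Int) (acc : List String) :
    l.foldl
      (fun acc i =>
        let p := PySem.List.pyGetD L i ("", "")
        if p.2 = "1" then
          acc ++ [if p.1 = "TRINIDAD" then "TRINIDAD Y TOBAGO" else p.1]
        else acc) acc
    = acc ++ (l.filter (fun i => decide ((PySem.List.pyGetD L i ("", "")).2 = "1"))).map
        (fun i => if (PySem.List.pyGetD L i ("", "")).1 = "TRINIDAD" then "TRINIDAD Y TOBAGO"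
          else (PySem.List.pyGetD L i ("", "")).1) :=
  PySem.List.foldl_append_ite _ _ l acc

theorem pvTail_cons (L : List (String × String)) (ind : Int) (h : ind < (L.length : Int)) :
    pvTail L ind =
      (let p := PySem.List.pyGetD L ind ("", "")
       if p.2 = "1" then
         (if p.1 = "TRINIDAD" then "TRINIDAD Y TOBAGO" else p.1) ++ ", " ++ pvTail L (ind + 1)
       else pvTail L (ind + 1)) := by
  simp only [pvTail, PySem.List.pyRange_one_cons h, foldl_step_eq, List.nil_append,
    List.filter_cons]
  by_cases hp : (PySem.List.pyGetD L ind ("", "")).2 = "1"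
  · simp [hp, join_empty_cons, String.append_assoc]
  · simp [hp]

theorem go_eq (L : List (String × String)) (arch : String) :
    ∀ (fuel : Nat) (ind : Int) (res : String),
      (((L.length : Int) - ind).toNat < fuel) →
      -(L.length : Int) ≤ ind → ind ≤ (L.length : Int) →
      especialGo L arch fuel ind res =
        "República de Costa Rica, 07-09-2018, " ++ arch ++ ", " ++ res ++ pvTail L ind ++ "1" := by
  intro fuel
  induction fuel with
  | zero => intro ind res hf _ _; omega
  | succ n ih =>
    intro ind res hf hlo hhi
    by_cases he : ind = (L.length : Int)
    · subst he
      simp [especialGo, pvTail_nil, String.append_empty]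
    · have hlt : ind < (L.length : Int) := lt_of_le_of_ne hhi he
      have hf' : ((L.length : Int) - (ind + 1)).toNat < n := by omega
      have hlo' : -(L.length : Int) ≤ ind + 1 := by omega
      have hhi' : ind + 1 ≤ (L.length : Int) := by omega
      rw [pvTail_cons L ind hlt]
      simp only [especialGo, if_neg he]
      by_cases hp : (PySem.List.pyGetD L ind ("", "")).2 = "1"
      · by_cases ht : (PySem.List.pyGetD L ind ("", "")).1 = "TRINIDAD"
        · simp only [hp, ht, ite_true]
          rw [ih (ind + 1) _ hf' hlo' hhi']
          have : ("TRINIDAD" ++ " Y TOBAGO, " : String) = "TRINIDAD Y TOBAGO" ++ ", " := by decide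
          simp [String.append_assoc, this]
        · simp only [hp, ht, ite_true, ite_false]
          rw [ih (ind + 1) _ hf' hlo' hhi']
          simp [String.append_assoc]
      · simp only [hp, ite_false]
        rw [ih (ind + 1) _ hf' hlo' hhi']

-- ===== VERDICT (by name: the statement is the Claim_ definition above) =====
theorem especial_spec : Claim_equal_especial := by
  intro men L ind arch res _ hpre
  unfold Spec_especial especial especial_alt
  rw [go_eq L arch _ ind res (by omega) hpre.1 hpre.2]
  rfl
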